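-- pv_equiv track=rewrite | github.com/danroblewis/bdd | bdd_server.py | match_test_to_facet
-- ===== SOURCE A (Python) =====
-- def normalize_test_id(test_id):
--     for ext in (".py", ".rs", ".js", ".ts", ".go"):
--         test_id = test_id.replace(ext, "")
--     test_id = test_id.replace("/", ".").replace("\\", ".")
--     return test_id.lower()
--
-- def match_test_to_facet(result_ids, facet_test_id):
--     if not facet_test_id:
--         return None, None
--     # Exact
--     if facet_test_id in result_ids:
--         return facet_test_id, result_ids[facet_test_id]
--     # Normalized
--     norm_facet = normalize_test_id(facet_test_id)
--     for rid, status in result_ids.items():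
--         if normalize_test_id(rid) == norm_facet:
--             return rid, status
--     # Suffix
--     if "::" in facet_test_id:
--         facet_suffix = facet_test_id.rsplit("::", 1)[-1].lower()
--         for rid, status in result_ids.items():
--             if "::" in rid:
--                 rid_suffix = rid.rsplit("::", 1)[-1].lower()
--                 if rid_suffix == facet_suffix:
--                     return rid, status
--     return None, None
-- ===== SOURCE B (Python) =====
-- def normalize_test_id(test_id):
--     for ext in (".py", ".rs", ".js", ".ts", ".go"):
--         test_id = test_id.replace(ext, "")
--     test_id = test_id.replace("/", ".").replace("\\", ".")
--     return test_id.lower()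
--
-- def match_test_to_facet(result_ids, facet_test_id):
--     if not facet_test_id:
--         return None, None
--     if facet_test_id in result_ids:
--         return facet_test_id, result_ids[facet_test_id]
--     norm_facet = normalize_test_id(facet_test_id)
--     facet_suffix = (facet_test_id.rsplit("::", 1)[-1].lower()
--                     if "::" in facet_test_id else None)
--     norm_hit = None
--     suffix_hit = None
--     for rid, status in result_ids.items():
--         if norm_hit is None and normalize_test_id(rid) == norm_facet:
--             norm_hit = (rid, status)
--         if (suffix_hit is None and facet_suffix is not None
--                 and "::" in rid
--                 and rid.rsplit("::", 1)[-1].lower() == facet_suffix):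
--             suffix_hit = (rid, status)
--     hit = norm_hit if norm_hit is not None else suffix_hit
--     return hit if hit is not None else (None, None)
-- ===== Notes on version B (the rewrite author's own statement) =====
-- stated objective: alternative
-- what changed: Replaced A's two sequential scans (normalized pass, then a separate suffix pass) by a single pass over result_ids that tracks the first normalized hit and the first suffix hit simultaneously and picks the normalized one afterwards.
import Mathlib
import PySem

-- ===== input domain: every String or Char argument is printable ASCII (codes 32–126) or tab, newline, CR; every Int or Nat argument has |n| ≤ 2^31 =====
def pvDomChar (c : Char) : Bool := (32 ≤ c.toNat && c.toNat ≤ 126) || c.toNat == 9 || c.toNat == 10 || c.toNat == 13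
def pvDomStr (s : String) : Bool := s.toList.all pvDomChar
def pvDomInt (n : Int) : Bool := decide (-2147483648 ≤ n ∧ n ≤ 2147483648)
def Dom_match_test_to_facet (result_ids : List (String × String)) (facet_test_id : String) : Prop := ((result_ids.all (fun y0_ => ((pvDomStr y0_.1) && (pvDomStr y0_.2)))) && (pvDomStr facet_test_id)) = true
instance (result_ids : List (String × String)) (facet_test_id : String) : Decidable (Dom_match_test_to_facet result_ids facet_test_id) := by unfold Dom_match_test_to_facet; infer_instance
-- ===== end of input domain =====

-- B replaces A's two sequential scans by a single pass tracking the first normalized and first suffix hit; alternative decomposition, same cost.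


-- ===== PORT A =====
-- shared helper (module-level in the Python source)
def normalize_test_id (test_id : String) : String :=
  let t := [".py", ".rs", ".js", ".ts", ".go"].foldl (fun t ext => PySem.Str.replace t ext "") test_id
  let t := PySem.Str.replace (PySem.Str.replace t "/" ".") "\\" "."
  PySem.Str.lower t

-- s.rsplit("::", 1)[-1].lower() — exact for s containing "::": everything after the LAST "::" (located with rfind), lowercased
def suffixLower (s : String) : String :=
  PySem.Str.lower (PySem.Str.slice s (some (PySem.Str.rfind s "::" + 2)) none)

-- A's first loop: first rid whose normalized form equals norm_facet
def aFindNorm (normFacet : String) : List (String × String) → Option (String × String)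
  | [] => none
  | (rid, st) :: rest =>
      if normalize_test_id rid = normFacet then some (rid, st) else aFindNorm normFacet rest

-- A's second loop: first rid containing "::" whose lowercased suffix equals facet_suffix
def aFindSuffix (facetSuffix : String) : List (String × String) → Option (String × String)
  | [] => none
  | (rid, st) :: rest =>
      if PySem.Str.isIn "::" rid then
        if suffixLower rid = facetSuffix then some (rid, st) else aFindSuffix facetSuffix rest
      else aFindSuffix facetSuffix rest

def match_test_to_facet (result_ids : List (String × String)) (facet_test_id : String) : Option String × Option String :=
  if facet_test_id = "" then (none, none)
  else if (PySem.Dict.mk result_ids).contains facet_test_id then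
    (some facet_test_id, (PySem.Dict.mk result_ids).get? facet_test_id)
  else
    match aFindNorm (normalize_test_id facet_test_id) result_ids with
    | some (rid, st) => (some rid, some st)
    | none =>
        if PySem.Str.isIn "::" facet_test_id then
          match aFindSuffix (suffixLower facet_test_id) result_ids with
          | some (rid, st) => (some rid, some st)
          | none => (none, none)
        else (none, none)

-- ===== PORT B =====
-- one step of B's single pass: fill norm_hit / suffix_hit when still empty
def bStep (normFacet : String) (facetSuffix : Option String)
    (acc : Option (String × String) × Option (String × String)) (p : String × String) :
    Option (String × String) × Option (String × String) :=
  ((match acc.1 with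
    | some x => some x
    | none => if normalize_test_id p.1 = normFacet then some p else none),
   (match acc.2 with
    | some x => some x
    | none =>
        match facetSuffix with
        | some fs =>
            if PySem.Str.isIn "::" p.1 then
              if suffixLower p.1 = fs then some p else none
            else none
        | none => none))

def match_test_to_facet_alt (result_ids : List (String × String)) (facet_test_id : String) : Option String × Option String :=
  if facet_test_id = "" then (none, none)
  else if (PySem.Dict.mk result_ids).contains facet_test_id then
    (some facet_test_id, (PySem.Dict.mk result_ids).get? facet_test_id)
  else
    let normFacet := normalize_test_id facet_test_id
    let facetSuffix := if PySem.Str.isIn "::" facet_test_id then some (suffixLower facet_test_id) else none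
    let r := result_ids.foldl (bStep normFacet facetSuffix) (none, none)
    match r.1 with
    | some (rid, st) => (some rid, some st)
    | none =>
        match r.2 with
        | some (rid, st) => (some rid, some st)
        | none => (none, none)

-- ===== PRECONDITION & SPEC =====
def Spec_match_test_to_facet (result_ids : List (String × String)) (facet_test_id : String) (out : Option String × Option String) : Prop := out = match_test_to_facet_alt result_ids facet_test_id
instance (result_ids : List (String × String)) (facet_test_id : String) (out : Option String × Option String) : Decidable (Spec_match_test_to_facet result_ids facet_test_id out) := by unfold Spec_match_test_to_facet; infer_instance

-- ===== CLAIM (what is proved, stated in full; the proofs are below) =====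
def Claim_equal_match_test_to_facet : Prop := ∀ (result_ids : List (String × String)) (facet_test_id : String), Dom_match_test_to_facet result_ids facet_test_id → Spec_match_test_to_facet result_ids facet_test_id (match_test_to_facet result_ids facet_test_id)

-- ===== LEMMAS AND PROOFS =====
def suffFind : Option String → List (String × String) → Option (String × String)
  | none, _ => none
  | some fs, l => aFindSuffix fs l

theorem bFold_eq (nf : String) (fsOpt : Option String) (l : List (String × String))
    (n s : Option (String × String)) :
    l.foldl (bStep nf fsOpt) (n, s) =
      ((match n with | some x => some x | none => aFindNorm nf l),
       (match s with | some x => some x | none => suffFind fsOpt l)) := by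
  induction l generalizing n s with
  | nil => cases n <;> cases s <;> cases fsOpt <;> rfl
  | cons hd tl ih =>
    obtain ⟨rid, st⟩ := hd
    simp only [List.foldl_cons]
    by_cases h : normalize_test_id rid = nf <;>
    cases fsOpt with
    | none =>
        cases n <;> cases s <;>
          simp [bStep, ih, h, aFindNorm, suffFind]
    | some fs =>
        by_cases h1 : PySem.Chars.isIn [':', ':'] rid.toList = true <;>
          by_cases h2 : suffixLower rid = fs <;>
          cases n <;> cases s <;>
          simp [bStep, ih, h, h1, h2, aFindNorm, aFindSuffix, suffFind]

-- ===== VERDICT (by name: the statement is the Claim_ definition above) =====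
theorem match_test_to_facet_spec : Claim_equal_match_test_to_facet := by
  intro result_ids facet_test_id _
  unfold Spec_match_test_to_facet match_test_to_facet match_test_to_facet_alt
  by_cases he : facet_test_id = ""
  · simp [he]
  · simp only [he, if_false]
    by_cases hc : (PySem.Dict.mk result_ids).contains facet_test_id = true
    · simp [hc]
    · simp only [Bool.not_eq_true] at hc
      simp only [hc, Bool.false_eq_true, if_false]
      rw [bFold_eq]
      cases hn : aFindNorm (normalize_test_id facet_test_id) result_ids with
      | some p => obtain ⟨rid, st⟩ := p; rfl
      | none =>
        by_cases hi : PySem.Chars.isIn [':', ':'] facet_test_id.toList = true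
        · simp [hi, suffFind]
        · simp [hi, suffFind]
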